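-- pv_equiv track=rewrite | github.com/AbrahamTartalos/alzheimer-multimodal-monitoring | src/modeling/ensemble_methods.py | identify_feature_groups
-- ===== SOURCE A (Python) =====
-- from typing import Dict, List, Tuple, Any
--
-- def identify_feature_groups(feature_names: List[str]) -> Dict[str, List[str]]:
--     """Identificar grupos de features por modalidad"""
--     groups = {
--         'genetic': [],
--         'biomarkers': [],
--         'cognitive': [],
--         'activity': [],
--         'demographics': []
--     }
--
--     for feature in feature_names:
--         feature_lower = feature.lower()
--         if any(x in feature_lower for x in ['apoe', 'genetic']):
--             groups['genetic'].append(feature)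
--         elif any(x in feature_lower for x in ['tau', 'abeta', 'biomarker']):
--             groups['biomarkers'].append(feature)
--         elif any(x in feature_lower for x in ['cdrsb', 'diagnosis', 'cognitive']):
--             groups['cognitive'].append(feature)
--         elif any(x in feature_lower for x in ['sleep', 'activity', 'steps']):
--             groups['activity'].append(feature)
--         elif any(x in feature_lower for x in ['age', 'gender', 'demo']):
--             groups['demographics'].append(feature)
--         else:
--             # Asignar a demographics por defecto
--             groups['demographics'].append(feature)
--
--     return groups
-- ===== SOURCE B (Python) =====
-- RULES = [
--     ('genetic', ('apoe', 'genetic')),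
--     ('biomarkers', ('tau', 'abeta', 'biomarker')),
--     ('cognitive', ('cdrsb', 'diagnosis', 'cognitive')),
--     ('activity', ('sleep', 'activity', 'steps')),
-- ]
--
-- CATEGORIES = ['genetic', 'biomarkers', 'cognitive', 'activity', 'demographics']
--
--
-- def _classify(feature):
--     fl = feature.lower()
--     for cat, kws in RULES:
--         if any(k in fl for k in kws):
--             return cat
--     return 'demographics'
--
--
-- def identify_feature_groups(feature_names):
--     """Identificar grupos de features por modalidad"""
--     return {cat: [f for f in feature_names if _classify(f) == cat]
--             for cat in CATEGORIES}
-- ===== Notes on version B (the rewrite author's own statement) =====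
-- stated objective: idiomatic
-- what changed: Replaces the single pass with an if/elif chain appending into a pre-built dict by a table-driven first-match classifier over an ordered RULES list plus a dict comprehension that filters the input once per category.
import Mathlib
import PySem

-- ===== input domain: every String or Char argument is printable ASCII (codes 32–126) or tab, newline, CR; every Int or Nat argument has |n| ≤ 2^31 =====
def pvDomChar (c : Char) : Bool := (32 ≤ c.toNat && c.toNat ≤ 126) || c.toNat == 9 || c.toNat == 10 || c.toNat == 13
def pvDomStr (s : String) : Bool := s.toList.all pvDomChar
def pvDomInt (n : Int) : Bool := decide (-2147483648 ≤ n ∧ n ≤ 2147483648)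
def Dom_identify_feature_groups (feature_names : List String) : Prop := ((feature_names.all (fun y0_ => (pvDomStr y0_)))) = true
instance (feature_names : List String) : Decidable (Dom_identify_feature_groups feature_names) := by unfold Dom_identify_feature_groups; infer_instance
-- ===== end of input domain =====

-- B replaces A's if/elif chain appending into a pre-built dict by a table-driven
-- first-match classifier plus one filter pass per category (idiomatic rewrite, same cost).

-- ===== PORT A =====
-- literal transliteration: dict of five empty lists, one loop, if/elif chain
def identify_feature_groups (feature_names : List String) : List (String × List String) :=
  let groups : PySem.Dict String (List String) :=
    PySem.Dict.ofList [("genetic", []), ("biomarkers", []), ("cognitive", []),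
                       ("activity", []), ("demographics", [])]
  (feature_names.foldl (fun groups feature =>
    let feature_lower := PySem.Str.lower feature
    if ["apoe", "genetic"].any (fun x => PySem.Str.isIn x feature_lower) then
      groups.modify "genetic" [] (fun v => v ++ [feature])
    else if ["tau", "abeta", "biomarker"].any (fun x => PySem.Str.isIn x feature_lower) then
      groups.modify "biomarkers" [] (fun v => v ++ [feature])
    else if ["cdrsb", "diagnosis", "cognitive"].any (fun x => PySem.Str.isIn x feature_lower) then
      groups.modify "cognitive" [] (fun v => v ++ [feature])
    else if ["sleep", "activity", "steps"].any (fun x => PySem.Str.isIn x feature_lower) then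
      groups.modify "activity" [] (fun v => v ++ [feature])
    else if ["age", "gender", "demo"].any (fun x => PySem.Str.isIn x feature_lower) then
      groups.modify "demographics" [] (fun v => v ++ [feature])
    else
      groups.modify "demographics" [] (fun v => v ++ [feature])) groups).items

-- ===== PORT B =====
def pvRules : List (String × List String) :=
  [("genetic", ["apoe", "genetic"]),
   ("biomarkers", ["tau", "abeta", "biomarker"]),
   ("cognitive", ["cdrsb", "diagnosis", "cognitive"]),
   ("activity", ["sleep", "activity", "steps"])]

def pvCategories : List String :=
  ["genetic", "biomarkers", "cognitive", "activity", "demographics"]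

-- the rules loop of _classify
def pvClassifyGo (rules : List (String × List String)) (fl : List Char) : String :=
  match rules with
  | [] => "demographics"
  | (cat, kws) :: rest =>
    if kws.any (fun k => PySem.Chars.isIn k.toList fl) then cat else pvClassifyGo rest fl

def pvClassify (feature : String) : String :=
  pvClassifyGo pvRules (PySem.Str.lower feature).toList

def identify_feature_groups_alt (feature_names : List String) : List (String × List String) :=
  pvCategories.map (fun cat => (cat, feature_names.filter (fun f => pvClassify f == cat)))

-- ===== PRECONDITION & SPEC =====
def Spec_identify_feature_groups (feature_names : List String) (out : List (String × List String)) : Prop := out = identify_feature_groups_alt feature_names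
instance (feature_names : List String) (out : List (String × List String)) : Decidable (Spec_identify_feature_groups feature_names out) := by unfold Spec_identify_feature_groups; infer_instance

-- ===== CLAIM (what is proved, stated in full; the proofs are below) =====
def Claim_equal_identify_feature_groups : Prop := ∀ (feature_names : List String), Dom_identify_feature_groups feature_names → Spec_identify_feature_groups feature_names (identify_feature_groups feature_names)

-- ===== LEMMAS AND PROOFS =====

-- the body of A's loop, named for the proof
def pvStepA (groups : PySem.Dict String (List String)) (feature : String) :
    PySem.Dict String (List String) :=
  let feature_lower := PySem.Str.lower feature
  if ["apoe", "genetic"].any (fun x => PySem.Str.isIn x feature_lower) then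
    groups.modify "genetic" [] (fun v => v ++ [feature])
  else if ["tau", "abeta", "biomarker"].any (fun x => PySem.Str.isIn x feature_lower) then
    groups.modify "biomarkers" [] (fun v => v ++ [feature])
  else if ["cdrsb", "diagnosis", "cognitive"].any (fun x => PySem.Str.isIn x feature_lower) then
    groups.modify "cognitive" [] (fun v => v ++ [feature])
  else if ["sleep", "activity", "steps"].any (fun x => PySem.Str.isIn x feature_lower) then
    groups.modify "activity" [] (fun v => v ++ [feature])
  else if ["age", "gender", "demo"].any (fun x => PySem.Str.isIn x feature_lower) then
    groups.modify "demographics" [] (fun v => v ++ [feature])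
  else
    groups.modify "demographics" [] (fun v => v ++ [feature])

theorem pvMain (l : List String) (vg vb vc va vd : List String) :
    (l.foldl pvStepA (PySem.Dict.mk
      [("genetic", vg), ("biomarkers", vb), ("cognitive", vc),
       ("activity", va), ("demographics", vd)])).items =
    [("genetic", vg ++ l.filter (fun f => pvClassify f == "genetic")),
     ("biomarkers", vb ++ l.filter (fun f => pvClassify f == "biomarkers")),
     ("cognitive", vc ++ l.filter (fun f => pvClassify f == "cognitive")),
     ("activity", va ++ l.filter (fun f => pvClassify f == "activity")),
     ("demographics", vd ++ l.filter (fun f => pvClassify f == "demographics"))] := by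
  induction l generalizing vg vb vc va vd with
  | nil => simp
  | cons f t ih =>
    by_cases h1 : (["apoe", "genetic"].any
        (fun x => PySem.Str.isIn x (PySem.Str.lower f))) = true
    · simp [PySem.Str.isIn] at h1
      have hc : pvClassify f = "genetic" := by
        simp [pvClassify, pvClassifyGo, pvRules, h1]
      have hstep : pvStepA (PySem.Dict.mk [("genetic", vg), ("biomarkers", vb),
          ("cognitive", vc), ("activity", va), ("demographics", vd)]) f
          = PySem.Dict.mk [("genetic", vg ++ [f]), ("biomarkers", vb), ("cognitive", vc),
            ("activity", va), ("demographics", vd)] := by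
        simp [pvStepA, PySem.Str.isIn, h1, PySem.Dict.modify, PySem.Dict.insert,
              PySem.Dict.getD, PySem.Dict.get?]
      simp only [List.foldl_cons, hstep]
      rw [ih]
      simp [hc]
    · by_cases h2 : (["tau", "abeta", "biomarker"].any
          (fun x => PySem.Str.isIn x (PySem.Str.lower f))) = true
      · simp [PySem.Str.isIn] at h1 h2
        have hc : pvClassify f = "biomarkers" := by
          simp [pvClassify, pvClassifyGo, pvRules, h1, h2]
        have hstep : pvStepA (PySem.Dict.mk [("genetic", vg), ("biomarkers", vb),
            ("cognitive", vc), ("activity", va), ("demographics", vd)]) f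
            = PySem.Dict.mk [("genetic", vg), ("biomarkers", vb ++ [f]), ("cognitive", vc),
            ("activity", va), ("demographics", vd)] := by
          simp [pvStepA, PySem.Str.isIn, h1, h2, PySem.Dict.modify, PySem.Dict.insert,
                PySem.Dict.getD, PySem.Dict.get?]
        simp only [List.foldl_cons, hstep]
        rw [ih]
        simp [hc]
      · by_cases h3 : (["cdrsb", "diagnosis", "cognitive"].any
            (fun x => PySem.Str.isIn x (PySem.Str.lower f))) = true
        · simp [PySem.Str.isIn] at h1 h2 h3
          have hc : pvClassify f = "cognitive" := by
            simp [pvClassify, pvClassifyGo, pvRules, h1, h2, h3]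
          have hstep : pvStepA (PySem.Dict.mk [("genetic", vg), ("biomarkers", vb),
              ("cognitive", vc), ("activity", va), ("demographics", vd)]) f
              = PySem.Dict.mk [("genetic", vg), ("biomarkers", vb), ("cognitive", vc ++ [f]),
            ("activity", va), ("demographics", vd)] := by
            simp [pvStepA, PySem.Str.isIn, h1, h2, h3, PySem.Dict.modify, PySem.Dict.insert,
                  PySem.Dict.getD, PySem.Dict.get?]
          simp only [List.foldl_cons, hstep]
          rw [ih]
          simp [hc]
        · by_cases h4 : (["sleep", "activity", "steps"].any
              (fun x => PySem.Str.isIn x (PySem.Str.lower f))) = true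
          · simp [PySem.Str.isIn] at h1 h2 h3 h4
            have hc : pvClassify f = "activity" := by
              simp [pvClassify, pvClassifyGo, pvRules, h1, h2, h3, h4]
            have hstep : pvStepA (PySem.Dict.mk [("genetic", vg), ("biomarkers", vb),
                ("cognitive", vc), ("activity", va), ("demographics", vd)]) f
                = PySem.Dict.mk [("genetic", vg), ("biomarkers", vb), ("cognitive", vc),
            ("activity", va ++ [f]), ("demographics", vd)] := by
              simp [pvStepA, PySem.Str.isIn, h1, h2, h3, h4, PySem.Dict.modify, PySem.Dict.insert,
                    PySem.Dict.getD, PySem.Dict.get?]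
            simp only [List.foldl_cons, hstep]
            rw [ih]
            simp [hc]
          · simp [PySem.Str.isIn] at h1 h2 h3 h4
            have hc : pvClassify f = "demographics" := by
              simp [pvClassify, pvClassifyGo, pvRules, h1, h2, h3, h4]
            have hstep : pvStepA (PySem.Dict.mk [("genetic", vg), ("biomarkers", vb),
                ("cognitive", vc), ("activity", va), ("demographics", vd)]) f
                = PySem.Dict.mk [("genetic", vg), ("biomarkers", vb), ("cognitive", vc),
            ("activity", va), ("demographics", vd ++ [f])] := by
              simp [pvStepA, PySem.Str.isIn, h1, h2, h3, h4, PySem.Dict.modify, PySem.Dict.insert,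
                    PySem.Dict.getD, PySem.Dict.get?]
            simp only [List.foldl_cons, hstep]
            rw [ih]
            simp [hc]


-- ===== VERDICT (by name: the statement is the Claim_ definition above) =====
theorem identify_feature_groups_spec : Claim_equal_identify_feature_groups := by
  intro feature_names _
  show identify_feature_groups feature_names = identify_feature_groups_alt feature_names
  unfold identify_feature_groups
  rw [show (PySem.Dict.ofList [("genetic", ([] : List String)), ("biomarkers", []),
        ("cognitive", []), ("activity", []), ("demographics", [])]
        : PySem.Dict String (List String))
      = PySem.Dict.mk [("genetic", []), ("biomarkers", []), ("cognitive", []),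
        ("activity", []), ("demographics", [])] from by decide]
  rw [show (fun (groups : PySem.Dict String (List String)) (feature : String) =>
      let feature_lower := PySem.Str.lower feature
      if ["apoe", "genetic"].any (fun x => PySem.Str.isIn x feature_lower) then
        groups.modify "genetic" [] (fun v => v ++ [feature])
      else if ["tau", "abeta", "biomarker"].any (fun x => PySem.Str.isIn x feature_lower) then
        groups.modify "biomarkers" [] (fun v => v ++ [feature])
      else if ["cdrsb", "diagnosis", "cognitive"].any (fun x => PySem.Str.isIn x feature_lower) then
        groups.modify "cognitive" [] (fun v => v ++ [feature])
      else if ["sleep", "activity", "steps"].any (fun x => PySem.Str.isIn x feature_lower) then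
        groups.modify "activity" [] (fun v => v ++ [feature])
      else if ["age", "gender", "demo"].any (fun x => PySem.Str.isIn x feature_lower) then
        groups.modify "demographics" [] (fun v => v ++ [feature])
      else
        groups.modify "demographics" [] (fun v => v ++ [feature])) = pvStepA from rfl]
  rw [pvMain]
  simp [identify_feature_groups_alt, pvCategories]
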